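-- pv_equiv track=rewrite | github.com/PranavMarthi/testingpoly | polymarket_geo/infer.py | _merge_key
-- ===== SOURCE A (Python) =====
-- def _merge_key(name: str) -> str:
--     """
--     Normalize a location name into a merge key so that
--     'Atlanta, GA' and 'Atlanta, GA, USA' merge together.
--     """
--     key = name.lower().strip()
--     # Strip trailing country qualifiers
--     for suffix in (", usa", ", united states", ", us",
--                    ", uk", ", united kingdom", ", canada"):
--         if key.endswith(suffix):
--             key = key[: -len(suffix)]
--             break
--     return key
-- ===== SOURCE B (Python) =====
-- _COUNTRIES = {"usa", "united states", "us", "uk", "united kingdom", "canada"}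
--
-- def _merge_key(name: str) -> str:
--     key = name.lower().strip()
--     head, sep, tail = key.rpartition(",")
--     if sep and tail.startswith(" ") and tail[1:] in _COUNTRIES:
--         return head
--     return key
-- ===== Notes on version B (the rewrite author's own statement) =====
-- stated objective: idiomatic
-- what changed: Replaces the per-suffix endswith loop over six country suffixes by a single rpartition at the last comma plus one set-membership test of the trailing segment.
import Mathlib
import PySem

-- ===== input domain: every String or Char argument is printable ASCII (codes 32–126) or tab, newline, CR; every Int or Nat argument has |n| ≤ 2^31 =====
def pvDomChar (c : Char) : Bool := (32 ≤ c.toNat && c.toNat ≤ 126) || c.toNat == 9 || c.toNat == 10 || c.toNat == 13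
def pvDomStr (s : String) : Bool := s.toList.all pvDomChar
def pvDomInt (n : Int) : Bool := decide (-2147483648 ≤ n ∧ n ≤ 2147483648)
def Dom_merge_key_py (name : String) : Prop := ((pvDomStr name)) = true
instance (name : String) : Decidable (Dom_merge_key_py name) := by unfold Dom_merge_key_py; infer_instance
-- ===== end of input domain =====

-- B replaces A's per-suffix endswith loop by one rpartition at the last comma plus a set-membership test (idiomatic; same cost).

-- ===== PORT A =====
def pvSuffixes : List String :=
  [", usa", ", united states", ", us", ", uk", ", united kingdom", ", canada"]

def mergeKeyLoop (key : String) : List String → String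
  | [] => key
  | s :: rest =>
    if PySem.Str.endswith key s then
      PySem.Str.slice key none (some (-(PySem.Str.len s)))   -- key[: -len(suffix)]
    else mergeKeyLoop key rest

def merge_key_py (name : String) : String :=
  mergeKeyLoop (PySem.Str.strip (PySem.Str.lower name)) pvSuffixes

-- ===== PORT B =====
def pvCountries : PySem.Set String :=
  PySem.Set.ofList ["usa", "united states", "us", "uk", "united kingdom", "canada"]

-- hand port of Python's key.rpartition(",") (exact for this one-char separator:
-- split at the LAST ',', found by a span over the reversed character list;
-- when no ',' is present it gives ("", "", s), like Python)
def pvRPartitionComma (s : String) : String × String × String :=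
  match List.span (fun c => c ≠ ',') s.toList.reverse with
  | (t, []) => ("", "", String.ofList t.reverse)
  | (t, _ :: w) => (String.ofList w.reverse, ",", String.ofList t.reverse)

def merge_key_py_alt (name : String) : String :=
  let key := PySem.Str.strip (PySem.Str.lower name)
  match pvRPartitionComma key with
  | (head, sep, tail) =>
    if sep ≠ "" ∧ PySem.Str.startswith tail " " = true
        ∧ PySem.Str.slice tail (some 1) none ∈ pvCountries
    then head else key

-- ===== PRECONDITION & SPEC =====
def Spec_merge_key_py (name : String) (out : String) : Prop := out = merge_key_py_alt name
instance (name : String) (out : String) : Decidable (Spec_merge_key_py name out) := by unfold Spec_merge_key_py; infer_instance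

-- ===== CLAIM (what is proved, stated in full; the proofs are below) =====
def Claim_equal_merge_key_py : Prop := ∀ (name : String), Dom_merge_key_py name → Spec_merge_key_py name (merge_key_py name)

-- ===== LEMMAS AND PROOFS =====

-- B's body after key normalisation, named for the lemmas only.
def pvAltCore (key : String) : String :=
  match pvRPartitionComma key with
  | (head, sep, tail) =>
    if sep ≠ "" ∧ PySem.Str.startswith tail " " = true
        ∧ PySem.Str.slice tail (some 1) none ∈ pvCountries
    then head else key

theorem pvAltCore_eq (name : String) :
    merge_key_py_alt name = pvAltCore (PySem.Str.strip (PySem.Str.lower name)) := rfl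

-- span at the first ',' of a list whose prefix u is comma-free
theorem pvSpanComma (u v : List Char) (hu : ',' ∉ u) :
    List.span (fun c => c ≠ ',') (u ++ ',' :: v) = (u, ',' :: v) := by
  induction u with
  | nil => simp [List.span_eq_takeWhile_dropWhile]
  | cons a u ih =>
    simp only [List.mem_cons, not_or] at hu
    have := ih hu.2
    simp_all [List.span_eq_takeWhile_dropWhile, List.takeWhile_cons, List.dropWhile_cons]
    exact ⟨fun h => hu.1 h.symm, fun h => absurd h.symm hu.1⟩

-- If key ends with ", " ++ c for a comma-free country c, B strips exactly A's suffix.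
theorem pvStripLemma (key c : String) (hc : ',' ∉ c.toList) (hmem : c ∈ pvCountries)
    (h : PySem.Str.endswith key (", " ++ c) = true) :
    pvAltCore key = PySem.Str.slice key none (some (-(PySem.Str.len (", " ++ c)))) := by
  rw [PySem.Str.endswith_eq, PySem.Chars.endswith_iff] at h
  obtain ⟨p, hp⟩ := h
  have htl : (", " ++ c).toList = ',' :: ' ' :: c.toList := by
    rw [String.toList_append]; rfl
  rw [htl] at hp
  have hrev : key.toList.reverse = (c.toList.reverse ++ [' ']) ++ ',' :: p.reverse := by
    rw [← hp]; simp
  have hu : ',' ∉ (c.toList.reverse ++ [' ']) := by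
    simp only [List.mem_append, List.mem_reverse, List.mem_singleton, not_or]
    exact ⟨hc, by decide⟩
  have hrp : pvRPartitionComma key = (String.ofList p, ",", String.ofList (' ' :: c.toList)) := by
    unfold pvRPartitionComma
    rw [hrev, pvSpanComma _ _ hu]
    simp
  have htail1 : PySem.Chars.startswith (' ' :: c.toList) [' '] = true := by
    rw [PySem.Chars.startswith_iff]
    exact ⟨c.toList, rfl⟩
  have htail2 : PySem.Str.slice (String.ofList (' ' :: c.toList)) (some 1) none = c := by
    have ht : (PySem.Str.slice (String.ofList (' ' :: c.toList)) (some 1) none).toList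
        = c.toList := by
      rw [PySem.Str.toList_slice, String.toList_ofList]
      simp [PySem.List.slice_from_one]
    calc PySem.Str.slice (String.ofList (' ' :: c.toList)) (some 1) none
        = String.ofList (PySem.Str.slice (String.ofList (' ' :: c.toList)) (some 1) none).toList :=
          String.ofList_toList.symm
      _ = String.ofList c.toList := by rw [ht]
      _ = c := String.ofList_toList
  have hlen : PySem.Str.len (", " ++ c) = ((c.toList.length + 2 : ℕ) : ℤ) := by
    rw [PySem.Str.len_eq, htl]
    simp only [List.length_cons]
  have hrt : (PySem.Str.slice key none (some (-(PySem.Str.len (", " ++ c))))).toList = p := by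
    rw [PySem.Str.toList_slice, hlen]
    rw [PySem.Chars.slice_eq_listSlice]
    rw [PySem.List.slice_to_neg_natCast _ _ (by omega)]
    rw [← hp]
    have hl : (p ++ ',' :: ' ' :: c.toList).length - (c.toList.length + 2) = p.length := by
      simp
    rw [hl]
    exact List.take_left
  have hrhs : PySem.Str.slice key none (some (-(PySem.Str.len (", " ++ c)))) = String.ofList p :=
    calc PySem.Str.slice key none (some (-(PySem.Str.len (", " ++ c))))
        = String.ofList (PySem.Str.slice key none (some (-(PySem.Str.len (", " ++ c))))).toList :=
          String.ofList_toList.symm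
      _ = String.ofList p := by rw [hrt]
  rw [hrhs]
  unfold pvAltCore
  rw [hrp]
  simp [htail1, htail2, hmem]

-- If key ends with none of the suffixes, B leaves it unchanged too.
theorem pvNoStripLemma (key : String)
    (h : ∀ c : String, c ∈ pvCountries → PySem.Str.endswith key (", " ++ c) = false) :
    pvAltCore key = key := by
  unfold pvAltCore pvRPartitionComma
  rcases e : List.span (fun c => c ≠ ',') key.toList.reverse with ⟨t, r⟩
  cases r with
  | nil => simp
  | cons ch w =>
    have hsp := e
    rw [List.span_eq_takeWhile_dropWhile, Prod.mk.injEq] at hsp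
    obtain ⟨ht, hd⟩ := hsp
    have hch : ch = ',' := by
      have h2 := List.head_dropWhile_not (fun c => c ≠ ',')
        (l := key.toList.reverse) (by rw [hd]; simp)
      simp only [hd, List.head_cons] at h2
      simpa using h2
    subst hch
    have hfull : t ++ ',' :: w = key.toList.reverse := by
      rw [← ht, ← hd]; exact List.takeWhile_append_dropWhile
    have hkeyeq : key.toList = w.reverse ++ ',' :: t.reverse := by
      calc key.toList = key.toList.reverse.reverse := by simp
        _ = (t ++ ',' :: w).reverse := by rw [hfull]
        _ = w.reverse ++ ',' :: t.reverse := by simp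
    show (if ("," : String) ≠ "" ∧ PySem.Str.startswith (String.ofList t.reverse) " " = true
        ∧ PySem.Str.slice (String.ofList t.reverse) (some 1) none ∈ pvCountries
      then String.ofList w.reverse else key) = key
    rw [if_neg]
    rintro ⟨-, hsw, hmem⟩
    rw [PySem.Str.startswith_eq, String.toList_ofList, PySem.Chars.startswith_iff] at hsw
    obtain ⟨rest, hrest⟩ := hsw
    have htrev : t.reverse = ' ' :: rest := by rw [← hrest]; rfl
    have hslice : PySem.Str.slice (String.ofList t.reverse) (some 1) none
        = String.ofList rest := by
      have ht2 : (PySem.Str.slice (String.ofList t.reverse) (some 1) none).toList = rest := by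
        rw [PySem.Str.toList_slice, String.toList_ofList, htrev]
        simp [PySem.List.slice_from_one]
      calc PySem.Str.slice (String.ofList t.reverse) (some 1) none
          = String.ofList (PySem.Str.slice (String.ofList t.reverse) (some 1) none).toList :=
            String.ofList_toList.symm
        _ = String.ofList rest := by rw [ht2]
    rw [hslice] at hmem
    have hend : PySem.Str.endswith key (", " ++ String.ofList rest) = true := by
      rw [PySem.Str.endswith_eq, PySem.Chars.endswith_iff]
      refine ⟨w.reverse, ?_⟩
      rw [String.toList_append, hkeyeq, htrev]
      simp [String.toList_ofList]
    rw [h _ hmem] at hend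
    cases hend

-- ===== VERDICT (by name: the statement is the Claim_ definition above) =====
theorem merge_key_py_spec : Claim_equal_merge_key_py := by
  unfold Claim_equal_merge_key_py Spec_merge_key_py
  intro name _
  rw [pvAltCore_eq]
  unfold merge_key_py
  generalize PySem.Str.strip (PySem.Str.lower name) = key
  by_cases h1 : PySem.Chars.endswith key.toList [',', ' ', 'u', 's', 'a'] = true
  · rw [pvStripLemma key "usa" (by decide) (by decide) h1]
    simp [mergeKeyLoop, pvSuffixes, h1]
  by_cases h2 : PySem.Chars.endswith key.toList [',', ' ', 'u', 'n', 'i', 't', 'e', 'd', ' ', 's', 't', 'a', 't', 'e', 's'] = true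
  · rw [pvStripLemma key "united states" (by decide) (by decide) h2]
    simp [mergeKeyLoop, pvSuffixes, h1, h2]
  by_cases h3 : PySem.Chars.endswith key.toList [',', ' ', 'u', 's'] = true
  · rw [pvStripLemma key "us" (by decide) (by decide) h3]
    simp [mergeKeyLoop, pvSuffixes, h1, h2, h3]
  by_cases h4 : PySem.Chars.endswith key.toList [',', ' ', 'u', 'k'] = true
  · rw [pvStripLemma key "uk" (by decide) (by decide) h4]
    simp [mergeKeyLoop, pvSuffixes, h1, h2, h3, h4]
  by_cases h5 : PySem.Chars.endswith key.toList [',', ' ', 'u', 'n', 'i', 't', 'e', 'd', ' ', 'k', 'i', 'n', 'g', 'd', 'o', 'm'] = true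
  · rw [pvStripLemma key "united kingdom" (by decide) (by decide) h5]
    simp [mergeKeyLoop, pvSuffixes, h1, h2, h3, h4, h5]
  by_cases h6 : PySem.Chars.endswith key.toList [',', ' ', 'c', 'a', 'n', 'a', 'd', 'a'] = true
  · rw [pvStripLemma key "canada" (by decide) (by decide) h6]
    simp [mergeKeyLoop, pvSuffixes, h1, h2, h3, h4, h5, h6]
  · have hall : ∀ c : String, c ∈ pvCountries →
        PySem.Str.endswith key (", " ++ c) = false := by
      intro c hc
      have hc' := (PySem.Set.mem_ofList _ _).mp hc
      simp only [List.mem_cons, List.not_mem_nil, or_false] at hc'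
      rcases hc' with rfl | rfl | rfl | rfl | rfl | rfl
      · simpa using h1
      · simpa using h2
      · simpa using h3
      · simpa using h4
      · simpa using h5
      · simpa using h6
    rw [pvNoStripLemma key hall]
    simp [mergeKeyLoop, pvSuffixes, h1, h2, h3, h4, h5, h6]
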